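-- pv_equiv track=rewrite | github.com/VerticalProject/navigabilite-V2 | app/kardex/alerting.py | aggregate_levels
-- ===== SOURCE A (Python) =====
-- def aggregate_levels(levels):
--     levels = [l for l in levels if l]
--     if not levels:
--         return "na"
--     if "overdue" in levels:
--         return "overdue"
--     if "warn" in levels:
--         return "warn"
--     if "ok" in levels:
--         return "ok"
--     return "na"
-- ===== SOURCE B (Python) =====
-- def aggregate_levels(levels):
--     priority = {"overdue": 3, "warn": 2, "ok": 1}
--     reverse = {3: "overdue", 2: "warn", 1: "ok", 0: "na"}
--     best = 0
--     for l in levels: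
--         if l:
--             best = max(best, priority.get(l, 0))
--     return reverse[best]
-- ===== Notes on version B (the rewrite author's own statement) =====
-- stated objective: alternative
-- what changed: Replaces the filter pass plus sequential membership scans with a single max-accumulating pass over a priority map, decoded through a reverse map at the end.
import Mathlib
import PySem

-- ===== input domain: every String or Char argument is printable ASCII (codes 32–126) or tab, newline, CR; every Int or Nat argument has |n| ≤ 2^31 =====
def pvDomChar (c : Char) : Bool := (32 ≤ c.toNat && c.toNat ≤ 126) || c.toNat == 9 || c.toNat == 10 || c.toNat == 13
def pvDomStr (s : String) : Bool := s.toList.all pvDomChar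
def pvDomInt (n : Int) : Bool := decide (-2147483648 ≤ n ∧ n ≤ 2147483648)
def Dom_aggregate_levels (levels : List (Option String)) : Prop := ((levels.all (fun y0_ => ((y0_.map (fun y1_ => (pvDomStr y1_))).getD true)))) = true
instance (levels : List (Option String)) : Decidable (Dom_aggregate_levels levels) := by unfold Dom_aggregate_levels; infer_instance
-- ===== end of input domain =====

-- B replaces A's filter pass followed by sequential membership scans with one
-- max-accumulating pass over a priority map, decoded by a reverse map (alternative decomposition).

-- ===== PORT A =====
-- Python truthiness of an Optional[str]: None and "" are falsy.
def pvTruthy (l : Option String) : Bool :=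
  match l with
  | none => false
  | some s => !(s == "")

def aggregate_levels (levels : List (Option String)) : String :=
  let lv := levels.filter pvTruthy
  if lv = [] then "na"
  else if (some "overdue") ∈ lv then "overdue"
  else if (some "warn") ∈ lv then "warn"
  else if (some "ok") ∈ lv then "ok"
  else "na"

-- ===== PORT B =====
def pvPriority : PySem.Dict String Int :=
  PySem.Dict.ofList [("overdue", 3), ("warn", 2), ("ok", 1)]

def pvReverse : PySem.Dict Int String :=
  PySem.Dict.ofList [(3, "overdue"), (2, "warn"), (1, "ok"), (0, "na")]

def pvStep (b : Int) (l : Option String) : Int :=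
  match l with
  | none => b
  | some s => if s == "" then b else max b (pvPriority.getD s 0)

def aggregate_levels_alt (levels : List (Option String)) : String :=
  let best := levels.foldl pvStep 0
  -- reverse[best]: the key is always present (best ∈ {0,1,2,3}), so getD's default is never used
  pvReverse.getD best "na"

-- ===== PRECONDITION & SPEC =====
def Spec_aggregate_levels (levels : List (Option String)) (out : String) : Prop := out = aggregate_levels_alt levels
instance (levels : List (Option String)) (out : String) : Decidable (Spec_aggregate_levels levels out) := by unfold Spec_aggregate_levels; infer_instance

-- ===== CLAIM (what is proved, stated in full; the proofs are below) =====
def Claim_equal_aggregate_levels : Prop := ∀ (levels : List (Option String)), Dom_aggregate_levels levels → Spec_aggregate_levels levels (aggregate_levels levels)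

-- ===== LEMMAS AND PROOFS =====

-- the value B's loop computes, characterised as an if-chain over memberships
def pvTgt (ls : List (Option String)) : Int :=
  if (some "overdue") ∈ ls then 3
  else if (some "warn") ∈ ls then 2
  else if (some "ok") ∈ ls then 1
  else 0

lemma pvTgt_nonneg (ls : List (Option String)) : 0 ≤ pvTgt ls := by
  unfold pvTgt; split_ifs <;> omega

lemma pvTgt_le_three (ls : List (Option String)) : pvTgt ls ≤ 3 := by
  unfold pvTgt; split_ifs <;> omega

lemma pvPriority_eval (s : String) :
    pvPriority.getD s 0 =
      if s = "overdue" then 3 else if s = "warn" then 2 else if s = "ok" then 1 else 0 := by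
  by_cases h1 : s = "overdue"
  · subst h1; decide
  · by_cases h2 : s = "warn"
    · subst h2; decide
    · by_cases h3 : s = "ok"
      · subst h3; decide
      · have hp : pvPriority = PySem.Dict.mk [("overdue", 3), ("warn", 2), ("ok", 1)] := by decide
        simp [hp, h1, h2, h3, PySem.Dict.getD_eq_get?_getD, PySem.Dict.get?,
              Ne.symm h1, Ne.symm h2, Ne.symm h3]

lemma pvFold_eq_max_tgt (ls : List (Option String)) :
    ∀ b : Int, 0 ≤ b → ls.foldl pvStep b = max b (pvTgt ls) := by
  induction ls with
  | nil =>
      intro b hb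
      simp [pvTgt]
      omega
  | cons l ls ih =>
      intro b hb
      have hstep : 0 ≤ pvStep b l := by
        cases l with
        | none => exact hb
        | some s =>
            simp only [pvStep]
            split_ifs
            · exact hb
            · exact le_max_of_le_left hb
      rw [List.foldl_cons, ih _ hstep]
      have hto := pvTgt_le_three ls
      have htn := pvTgt_nonneg ls
      cases l with
      | none =>
          have ht : pvTgt (none :: ls) = pvTgt ls := by simp [pvTgt, List.mem_cons]
          rw [ht]
          rfl
      | some s =>
          by_cases he : s = ""
          · subst he
            have ht : pvTgt (some "" :: ls) = pvTgt ls := by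
              simp [pvTgt, List.mem_cons]
            rw [ht]
            rfl
          · have hps : pvStep b (some s) =
                max b (if s = "overdue" then 3 else if s = "warn" then 2
                       else if s = "ok" then 1 else 0) := by
              simp [pvStep, he, pvPriority_eval]
            rw [hps]
            by_cases h1 : s = "overdue"
            · subst h1
              have ht : pvTgt (some "overdue" :: ls) = 3 := by
                simp [pvTgt, List.mem_cons]
              rw [ht, if_pos rfl]
              omega
            · by_cases h2 : s = "warn"
              · subst h2
                have ht : pvTgt (some "warn" :: ls) =
                    if (some ("overdue" : String)) ∈ ls then 3 else 2 := by
                  simp [pvTgt, List.mem_cons]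
                rw [ht, if_neg h1, if_pos rfl]
                by_cases hov : (some ("overdue" : String)) ∈ ls
                · have h3' : pvTgt ls = 3 := by simp [pvTgt, hov]
                  rw [if_pos hov]
                  omega
                · have h2' : pvTgt ls ≤ 2 := by
                    simp only [pvTgt, hov, if_false]
                    split_ifs <;> omega
                  rw [if_neg hov]
                  omega
              · by_cases h3 : s = "ok"
                · subst h3
                  have ht : pvTgt (some "ok" :: ls) =
                      if (some ("overdue" : String)) ∈ ls then 3
                      else if (some ("warn" : String)) ∈ ls then 2 else 1 := by
                    simp [pvTgt, List.mem_cons]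
                  rw [ht, if_neg h1, if_neg h2, if_pos rfl]
                  by_cases hov : (some ("overdue" : String)) ∈ ls
                  · have h3' : pvTgt ls = 3 := by simp [pvTgt, hov]
                    rw [if_pos hov]
                    omega
                  · rw [if_neg hov]
                    by_cases hw : (some ("warn" : String)) ∈ ls
                    · have h2' : pvTgt ls = 2 := by simp [pvTgt, hov, hw]
                      rw [if_pos hw]
                      omega
                    · have h1' : pvTgt ls ≤ 1 := by
                        simp only [pvTgt, hov, hw, if_false]
                        split_ifs <;> omega
                      rw [if_neg hw]
                      omega
                · have ht : pvTgt (some s :: ls) = pvTgt ls := by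
                    simp [pvTgt, List.mem_cons, Ne.symm h1, Ne.symm h2, Ne.symm h3]
                  rw [ht, if_neg h1, if_neg h2, if_neg h3]
                  omega

lemma pvMem_filter (x : String) (hx : pvTruthy (some x) = true) (ls : List (Option String)) :
    (some x) ∈ ls.filter pvTruthy ↔ (some x) ∈ ls := by
  simp [List.mem_filter, hx]

-- ===== VERDICT (by name: the statement is the Claim_ definition above) =====
theorem aggregate_levels_spec : Claim_equal_aggregate_levels := by
  intro levels _
  unfold Spec_aggregate_levels aggregate_levels aggregate_levels_alt
  rw [pvFold_eq_max_tgt levels 0 le_rfl, max_eq_right (pvTgt_nonneg levels)]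
  have hov := pvMem_filter "overdue" (by decide) levels
  have hw := pvMem_filter "warn" (by decide) levels
  have hok := pvMem_filter "ok" (by decide) levels
  by_cases hfe : levels.filter pvTruthy = []
  · simp only [hfe, List.not_mem_nil] at hov hw hok
    have ht : pvTgt levels = 0 := by simp [pvTgt, ← hov, ← hw, ← hok]
    rw [ht, if_pos hfe]
    decide
  · rw [if_neg hfe]
    by_cases c1 : (some ("overdue" : String)) ∈ levels
    · have ht : pvTgt levels = 3 := by simp [pvTgt, c1]
      rw [ht, if_pos (hov.mpr c1)]
      decide
    · rw [if_neg (fun h => c1 (hov.mp h))]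
      by_cases c2 : (some ("warn" : String)) ∈ levels
      · have ht : pvTgt levels = 2 := by simp [pvTgt, c1, c2]
        rw [ht, if_pos (hw.mpr c2)]
        decide
      · rw [if_neg (fun h => c2 (hw.mp h))]
        by_cases c3 : (some ("ok" : String)) ∈ levels
        · have ht : pvTgt levels = 1 := by simp [pvTgt, c1, c2, c3]
          rw [ht, if_pos (hok.mpr c3)]
          decide
        · have ht : pvTgt levels = 0 := by simp [pvTgt, c1, c2, c3]
          rw [ht, if_neg (fun h => c3 (hok.mp h))]
          decide
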